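-- pv_equiv track=rewrite | github.com/francirleyoliveira/ConsultaGTIN | app/gui/table_utils.py | apply_column_filters
-- ===== SOURCE A (Python) =====
-- from typing import Any
--
-- def _normalize_text(value: Any) -> str:
--     if value is None:
--         return ""
--     return str(value).strip().casefold()
--
-- def apply_column_filters(records: list[dict[str, Any]], filters: dict[str, str]) -> list[dict[str, Any]]:
--     active_filters = {
--         key: str(value).strip().casefold()
--         for key, value in filters.items()
--         if str(value).strip()
--     }
--     if not active_filters:
--         return list(records)
--
--     filtered: list[dict[str, Any]] = []
--     for record in records:
--         if all(value in _normalize_text(record.get(key, "")) for key, value in active_filters.items()):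
--             filtered.append(record)
--     return filtered
-- ===== SOURCE B (Python) =====
-- from typing import Any
--
-- def _cell(record: dict, key: str) -> str:
--     value = record.get(key, "")
--     if value is None:
--         return ""
--     return str(value).strip().casefold()
--
-- def _refine(result, pending):
--     for key, want in pending:
--         result = [record for record in result if want in _cell(record, key)]
--     return result
--
-- def apply_column_filters(records: list[dict[str, Any]], filters: dict[str, str]) -> list[dict[str, Any]]:
--     pending = [(key, str(text).strip().casefold())
--                for key, text in filters.items()
--                if str(text).strip()]
--     return _refine(list(records), pending)
-- ===== Notes on version B (the rewrite author's own statement) =====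
-- stated objective: alternative
-- what changed: A builds a filter dict and makes one pass over records testing all active filters per record with 'all'; B collects the active (key, needle) pairs as a list comprehension and recursively narrows a fresh copy of the record list one filter at a time (each stage a list comprehension over the previous stage's survivors).
import Mathlib
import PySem

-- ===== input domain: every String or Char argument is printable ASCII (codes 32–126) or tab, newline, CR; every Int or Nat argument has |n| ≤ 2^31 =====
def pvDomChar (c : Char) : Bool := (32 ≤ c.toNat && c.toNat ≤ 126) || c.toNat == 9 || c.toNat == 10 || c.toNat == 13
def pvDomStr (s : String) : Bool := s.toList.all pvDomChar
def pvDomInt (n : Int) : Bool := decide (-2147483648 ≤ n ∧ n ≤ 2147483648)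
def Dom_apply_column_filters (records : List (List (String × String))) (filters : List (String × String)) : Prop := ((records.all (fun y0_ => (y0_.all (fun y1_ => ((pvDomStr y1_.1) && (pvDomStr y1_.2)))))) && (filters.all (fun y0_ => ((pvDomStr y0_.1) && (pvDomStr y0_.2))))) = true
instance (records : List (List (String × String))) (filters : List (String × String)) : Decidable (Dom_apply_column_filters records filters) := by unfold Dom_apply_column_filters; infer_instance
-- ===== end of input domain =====

-- B collects the active (key, needle) pairs as a plain list and recursively narrows a
-- fresh copy of the record list one filter per stage, instead of A's dict-building pass
-- that tests all filters on each record (alternative decomposition; same cost).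


-- ===== PORT A =====
-- _normalize_text on a string value (values here are always str, never None); casefold = lower on the ASCII domain
def pvNormalizeText (s : String) : String := PySem.Str.lower (PySem.Str.strip s)

-- the dict comprehension building active_filters
def pvActiveFilters (filters : List (String × String)) : PySem.Dict String String :=
  (PySem.Dict.ofList filters).items.foldl
    (fun d kv =>
      if PySem.Str.strip kv.2 ≠ "" then d.insert kv.1 (PySem.Str.lower (PySem.Str.strip kv.2)) else d)
    PySem.Dict.empty

-- does `value in _normalize_text(record.get(key, ""))` hold?
def pvMatches (record : List (String × String)) (kv : String × String) : Bool :=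
  PySem.Str.isIn kv.2 (pvNormalizeText ((PySem.Dict.ofList record).getD kv.1 ""))

def apply_column_filters (records : List (List (String × String))) (filters : List (String × String)) : List (List (String × String)) :=
  let active := pvActiveFilters filters
  if active.items = [] then records
  else
    records.foldl
      (fun filtered record =>
        if active.items.all (fun kv => pvMatches record kv) then filtered ++ [record] else filtered)
      []

-- ===== PORT B =====
-- the list comprehension collecting the active (key, needle) pairs
def pvPending (filters : List (String × String)) : List (String × String) :=
  (PySem.Dict.ofList filters).items.filterMap (fun kv =>
    if PySem.Str.strip kv.2 = "" then none
    else some (kv.1, PySem.Str.lower (PySem.Str.strip kv.2)))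

-- _cell: the record's value under key, normalized (values are always str here)
def pvCell (record : List (String × String)) (key : String) : String :=
  PySem.Str.lower (PySem.Str.strip ((PySem.Dict.ofList record).getD key ""))

-- _refine: recursively narrow the survivors by one pending filter per stage
def pvRefine : List (List (String × String)) → List (String × String) → List (List (String × String))
  | result, [] => result
  | result, (key, want) :: rest =>
      pvRefine (result.filter (fun record => PySem.Str.isIn want (pvCell record key))) rest

def apply_column_filters_alt (records : List (List (String × String))) (filters : List (String × String)) : List (List (String × String)) :=
  pvRefine records (pvPending filters)

-- ===== PRECONDITION & SPEC =====
def Spec_apply_column_filters (records : List (List (String × String))) (filters : List (String × String)) (out : List (List (String × String))) : Prop := out = apply_column_filters_alt records filters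
instance (records : List (List (String × String))) (filters : List (String × String)) (out : List (List (String × String))) : Decidable (Spec_apply_column_filters records filters out) := by unfold Spec_apply_column_filters; infer_instance

-- ===== CLAIM =====
def Claim_equal_apply_column_filters : Prop := ∀ (records : List (List (String × String))) (filters : List (String × String)), Dom_apply_column_filters records filters → Spec_apply_column_filters records filters (apply_column_filters records filters)

-- ===== LEMMAS AND PROOFS =====

-- A's guarded insert-fold over fresh distinct keys appends exactly B's filterMap list
theorem pv_activeFoldl_items (l : List (String × String)) (d : PySem.Dict String String)
    (hfresh : ∀ p ∈ l, d.contains p.1 = false) (hnd : (l.map (·.1)).Nodup) :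
    (l.foldl
      (fun d kv =>
        if PySem.Str.strip kv.2 ≠ "" then d.insert kv.1 (PySem.Str.lower (PySem.Str.strip kv.2)) else d)
      d).items
    = d.items ++ l.filterMap (fun kv =>
        if PySem.Str.strip kv.2 = "" then none
        else some (kv.1, PySem.Str.lower (PySem.Str.strip kv.2))) := by
  induction l generalizing d with
  | nil => simp
  | cons kv rest ih =>
    simp only [List.map_cons, List.nodup_cons] at hnd
    by_cases h : PySem.Str.strip kv.2 = ""
    · simp only [List.foldl_cons, List.filterMap_cons, if_neg (not_not_intro h), if_pos h]
      exact ih d (fun p hp => hfresh p (List.mem_cons_of_mem _ hp)) hnd.2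
    · simp only [List.foldl_cons, List.filterMap_cons, if_pos h, if_neg h]
      rw [ih (d.insert kv.1 (PySem.Str.lower (PySem.Str.strip kv.2)))
          (fun p hp => by
            have hne : (p.1 == kv.1) = false := by
              simp only [beq_eq_false_iff_ne, ne_eq]
              intro he
              exact hnd.1 (he ▸ List.mem_map_of_mem hp)
            simp [PySem.Dict.contains_insert, hne, hfresh p (List.mem_cons_of_mem _ hp)])
          hnd.2,
        PySem.Dict.items_insert_of_not_contains d _ (hfresh kv List.mem_cons_self)]
      simp

theorem pv_active_eq_pending (filters : List (String × String)) :
    (pvActiveFilters filters).items = pvPending filters := by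
  unfold pvActiveFilters pvPending
  rw [pv_activeFoldl_items _ PySem.Dict.empty
      (fun p _ => PySem.Dict.contains_empty p.1)
      (by
        have := PySem.Dict.nodup_keys_ofList (κ := String) (ν := String) filters
        simpa [PySem.Dict.keys] using this)]
  rfl

-- B's staged narrowing equals one filter by the conjunction of all pending filters
theorem pv_refine_eq_filter (l : List (String × String)) :
    ∀ (rs : List (List (String × String))),
      pvRefine rs l = rs.filter (fun r => l.all (fun kv => PySem.Str.isIn kv.2 (pvCell r kv.1))) := by
  induction l with
  | nil => intro rs; simp [pvRefine]
  | cons kv rest ih =>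
    intro rs
    obtain ⟨key, want⟩ := kv
    simp only [pvRefine, ih, List.filter_filter, List.all_cons]
    exact List.filter_congr (fun r _ => by rw [Bool.and_comm])

theorem apply_column_filters_eq (records : List (List (String × String))) (filters : List (String × String)) :
    apply_column_filters records filters = apply_column_filters_alt records filters := by
  unfold apply_column_filters apply_column_filters_alt
  rw [pv_refine_eq_filter, ← pv_active_eq_pending]
  by_cases h : (pvActiveFilters filters).items = []
  · simp [h]
  · have hfold := PySem.List.foldl_append_if
        (fun record => (pvActiveFilters filters).items.all (fun kv => pvMatches record kv)) id records []
    simp only [id_eq] at hfold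
    simp only [if_neg h, hfold, List.nil_append, List.map_id]
    exact List.filter_congr (fun r _ => by
      simp [pvMatches, pvNormalizeText, pvCell])

-- ===== VERDICT =====
theorem apply_column_filters_spec : Claim_equal_apply_column_filters := by
  intro records filters _
  exact apply_column_filters_eq records filters
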